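-- pv_equiv track=rewrite | github.com/nehaa0305/github-automation-lab | pipeline.py | _get_time_range
-- ===== SOURCE A (Python) =====
-- from typing import Dict, Any, List, Optional
--
-- def _get_time_range(feedback_data: List[Dict[str, Any]]) -> str:
--     """Get time range from feedback data."""
--     if not feedback_data:
--         return "Unknown"
--
--     timestamps = [entry.get("ts", "") for entry in feedback_data if entry.get("ts")]
--     if not timestamps:
--         return "Unknown"
--
--     timestamps.sort()
--     return f"{timestamps[0]} to {timestamps[-1]}"
-- ===== SOURCE B (Python) =====
-- def _get_time_range(feedback_data):
--     """Get time range from feedback data."""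
--     if not feedback_data:
--         return "Unknown"
--
--     lo = hi = None
--     for entry in feedback_data:
--         ts = entry.get("ts")
--         if ts:
--             if lo is None or ts < lo:
--                 lo = ts
--             if hi is None or hi < ts:
--                 hi = ts
--
--     if lo is None:
--         return "Unknown"
--     return f"{lo} to {hi}"
-- ===== Notes on version B (the rewrite author's own statement) =====
-- stated objective: alternative
-- what changed: Replaces building a timestamp list plus an in-place sort and endpoint indexing with one fused pass that tracks the running minimum and maximum directly (no intermediate list, no sort).
import Mathlib
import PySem

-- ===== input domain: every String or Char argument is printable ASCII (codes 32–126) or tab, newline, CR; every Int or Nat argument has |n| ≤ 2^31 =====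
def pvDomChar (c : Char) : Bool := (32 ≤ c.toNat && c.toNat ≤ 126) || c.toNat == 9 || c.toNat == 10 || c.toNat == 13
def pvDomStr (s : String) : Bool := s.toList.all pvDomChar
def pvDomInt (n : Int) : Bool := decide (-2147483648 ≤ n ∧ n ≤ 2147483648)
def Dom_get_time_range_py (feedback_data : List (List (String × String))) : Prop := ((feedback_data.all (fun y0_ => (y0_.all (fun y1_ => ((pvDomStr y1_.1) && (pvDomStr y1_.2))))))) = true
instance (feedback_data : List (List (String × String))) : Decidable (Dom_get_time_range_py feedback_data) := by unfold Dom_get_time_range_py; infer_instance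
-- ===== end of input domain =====

-- B replaces A's list-build + in-place sort + endpoint indexing by one fused pass
-- tracking the running minimum and maximum (objective: alternative algorithm).

-- ===== PORT A =====
-- `entry.get("ts")` is truthy iff the key is present with a non-empty value.
def pvTsOf (entry : List (String × String)) : Option String :=
  match PySem.Dict.get? (PySem.Dict.mk entry) "ts" with
  | some s => if s ≠ "" then some s else none
  | none => none

def get_time_range_py (feedback_data : List (List (String × String))) : String :=
  if feedback_data = [] then "Unknown"
  else
    let timestamps := feedback_data.filterMap pvTsOf
    if timestamps = [] then "Unknown"
    else
      let s := PySem.List.sorted timestamps (fun x => x) false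
      ((PySem.List.pyGet? s 0).getD "") ++ " to " ++ ((PySem.List.pyGet? s (-1)).getD "")

-- ===== PORT B =====
-- one step of B's loop: fold the entry's timestamp (if any) into (lo, hi)
def pvStep (acc : Option String × Option String) (entry : List (String × String)) :
    Option String × Option String :=
  match pvTsOf entry with
  | none => acc
  | some ts =>
    ((match acc.1 with | none => some ts | some l => if ts < l then some ts else some l),
     (match acc.2 with | none => some ts | some h => if h < ts then some ts else some h))

def get_time_range_py_alt (feedback_data : List (List (String × String))) : String :=
  if feedback_data = [] then "Unknown"
  else
    match feedback_data.foldl pvStep (none, none) with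
    | (some l, some h) => l ++ " to " ++ h
    | _ => "Unknown"

-- ===== PRECONDITION & SPEC =====
def Spec_get_time_range_py (feedback_data : List (List (String × String))) (out : String) : Prop := out = get_time_range_py_alt feedback_data
instance (feedback_data : List (List (String × String))) (out : String) : Decidable (Spec_get_time_range_py feedback_data out) := by unfold Spec_get_time_range_py; infer_instance

-- ===== CLAIM (what is proved, stated in full; the proofs are below) =====
def Claim_equal_get_time_range_py : Prop := ∀ (feedback_data : List (List (String × String))), Dom_get_time_range_py feedback_data → Spec_get_time_range_py feedback_data (get_time_range_py feedback_data)

-- ===== LEMMAS AND PROOFS =====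

-- the fused fold over the entries equals a min/max fold over the extracted timestamp list
def pvMM (acc : Option String × Option String) (ts : String) :
    Option String × Option String :=
  ((match acc.1 with | none => some ts | some l => if ts < l then some ts else some l),
   (match acc.2 with | none => some ts | some h => if h < ts then some ts else some h))

theorem pvStep_eq_mm (fd : List (List (String × String))) (acc : Option String × Option String) :
    fd.foldl pvStep acc = (fd.filterMap pvTsOf).foldl pvMM acc := by
  induction fd generalizing acc with
  | nil => rfl
  | cons e t ih =>
    simp only [List.foldl_cons, List.filterMap_cons]
    cases h : pvTsOf e with
    | none => simpa [pvStep, h] using ih acc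
    | some s => simpa [pvStep, pvMM, h] using ih (pvMM acc s)

theorem pvMM_some (t : List String) (l h : String) :
    t.foldl pvMM (some l, some h) = (some (t.foldl min l), some (t.foldl max h)) := by
  induction t generalizing l h with
  | nil => rfl
  | cons x xs ih =>
    simp only [List.foldl_cons, pvMM]
    have e1 : (if x < l then some x else some l) = some (min l x) := by
      rcases lt_or_ge x l with hx | hx
      · simp [hx, min_eq_right hx.le]
      · simp [not_lt.mpr hx, min_eq_left hx]
    have e2 : (if h < x then some x else some h) = some (max h x) := by
      rcases lt_or_ge h x with hx | hx
      · simp [hx, max_eq_right hx.le]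
      · simp [not_lt.mpr hx, max_eq_left hx]
    rw [e1, e2, ih]

theorem pvMM_cons (a : String) (t : List String) :
    (a :: t).foldl pvMM (none, none) = (some (t.foldl min a), some (t.foldl max a)) := by
  simp only [List.foldl_cons, pvMM]
  exact pvMM_some t a a

-- min/max over the list equal the first and last element of its sort
theorem pv_sorted_head_last (a : String) (t : List String) :
    ∃ m s, PySem.List.sorted (a :: t) (fun x => x) false = m :: s ∧
      m = t.foldl min a ∧ (m :: s).getLast (by simp) = t.foldl max a := by
  obtain ⟨m, s, hms⟩ : ∃ m s, PySem.List.sorted (a :: t) (fun x => x) false = m :: s := by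
    cases hs : PySem.List.sorted (a :: t) (fun x => x) false with
    | nil => exact absurd ((PySem.List.sorted_eq_nil_iff _ _ _).mp hs) (by simp)
    | cons m s => exact ⟨m, s, rfl⟩
  refine ⟨m, s, hms, ?_, ?_⟩
  · -- head is the minimum
    have hmin_le := PySem.List.foldl_min_le t a
    have hmin_mem := PySem.List.foldl_min_mem t a
    have hm_le : ∀ y ∈ (a :: t), m ≤ y := PySem.List.key_head_sorted_le _ (fun x => x) hms
    have hmem : t.foldl min a ∈ (a :: t) := by
      rcases hmin_mem with h | h
      · simp [h]
      · exact List.mem_cons_of_mem _ h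
    have hm_mem : m ∈ (a :: t) := by
      have := PySem.List.mem_sorted (a :: t) (fun x => x) false m
      rw [hms] at this; exact this.mp (by simp)
    have h2 : t.foldl min a ≤ m := by
      rcases List.mem_cons.mp hm_mem with h | h
      · exact h ▸ hmin_le.1
      · exact hmin_le.2 _ h
    exact le_antisymm (hm_le _ hmem) h2
  · -- last is the maximum
    set L := (m :: s).getLast (by simp) with hL
    have hmax_le := PySem.List.le_foldl_max t a
    have hmax_mem := PySem.List.foldl_max_mem t a
    have hLmem : L ∈ (a :: t) := by
      have hmem : L ∈ m :: s := List.getLast_mem (by simp)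
      have := PySem.List.mem_sorted (a :: t) (fun x => x) false L
      rw [hms] at this; exact this.mp hmem
    have h1 : L ≤ t.foldl max a := by
      rcases List.mem_cons.mp hLmem with h | h
      · exact h ▸ hmax_le.1
      · exact hmax_le.2 _ h
    have h2 : t.foldl max a ≤ L := by
      have hmem : t.foldl max a ∈ (a :: t) := by
        rcases hmax_mem with h | h
        · simp [h]
        · exact List.mem_cons_of_mem _ h
      have hmem' : t.foldl max a ∈ PySem.List.sorted (a :: t) (fun x => x) false :=
        (PySem.List.mem_sorted _ _ _ _).mpr hmem
      obtain ⟨p, hp, hpe⟩ := List.getElem_of_mem hmem'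
      have hlen : (PySem.List.sorted (a :: t) (fun x => x) false).length = s.length + 1 := by
        rw [hms]; simp
      have hmono := PySem.List.sorted_id_getElem_mono (a :: t)
        (p := p) (q := (PySem.List.sorted (a :: t) (fun x => x) false).length - 1)
        (by omega) (by omega)
      rw [hpe] at hmono
      have hlast_eq : (PySem.List.sorted (a :: t) (fun x => x) false)[(PySem.List.sorted (a :: t) (fun x => x) false).length - 1]'(by omega) = L := by
        rw [hL, List.getLast_eq_getElem (l := m :: s)]
        congr 1
        rw [hms]
      rw [hlast_eq] at hmono
      exact hmono
    exact le_antisymm h1 h2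

theorem pv_main (fd : List (List (String × String))) :
    get_time_range_py_alt fd = get_time_range_py fd := by
  unfold get_time_range_py get_time_range_py_alt
  by_cases hfd : fd = []
  · simp [hfd]
  · simp only [if_neg hfd]
    rw [pvStep_eq_mm]
    cases hts : fd.filterMap pvTsOf with
    | nil => simp
    | cons a t =>
      rw [pvMM_cons a t]
      obtain ⟨m, s, hms, hm, hl⟩ := pv_sorted_head_last a t
      simp only [if_neg (by simp : ¬ a :: t = [])]
      rw [hms]
      have h0 : PySem.List.pyGet? (m :: s) (0 : Int) = some m := by
        simp [PySem.List.pyGet?, PySem.List.pyIdx?]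
      have hneg : PySem.List.pyGet? (m :: s) (-1 : Int) = some ((m :: s).getLast (by simp)) := by
        simp only [PySem.List.pyGet?, PySem.List.pyIdx?, List.getLast_eq_getElem]
        norm_num
        rfl
      rw [h0, hneg, hl, ← hm]
      simp

-- ===== VERDICT (by name: the statement is the Claim_ definition above) =====
theorem get_time_range_py_spec : Claim_equal_get_time_range_py := by
  intro fd _
  unfold Spec_get_time_range_py
  exact (pv_main fd).symm
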